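-- pv_equiv track=rewrite | github.com/RNAcentral/rnacentral-import-pipeline | rnacentral_pipeline/databases/helpers/embl.py | grouped_annotations
-- ===== SOURCE A (Python) =====
-- import collections as coll
-- import typing as ty
--
-- def grouped_annotations(raw, split) -> ty.Dict[str, ty.List[str]]:
--     """
--     Parse a raw string into a dict. This will produce a key value mappign where
--     the key is everything before the first split and values is everything
--     after. The mapping values will be lists. This will correct RNACentral to
--     RNAcentral.
--     """
--
--     parsed = coll.defaultdict(set)
--     for entry in raw:
--         if split not in entry:
--             continue
--         key, value = entry.split(split, 1)
--         if key == "RNACentral":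
--             key = "RNAcentral"
--         parsed[key].add(value)
--     return {k: sorted(v) for k, v in parsed.items()}
-- ===== SOURCE B (Python) =====
-- def grouped_annotations(raw, split):
--     pairs = []
--     for entry in raw:
--         if split in entry:
--             key, value = entry.split(split, 1)
--             pairs.append(("RNAcentral" if key == "RNACentral" else key, value))
--     result = {}
--     for key, _ in pairs:
--         if key not in result:
--             result[key] = sorted({v for k, v in pairs if k == key})
--     return result
-- ===== Notes on version B (the rewrite author's own statement) =====
-- stated objective: alternative
-- what changed: replaces the incremental defaultdict-of-sets with a flat corrected (key, value) pair list followed by a per-distinct-key filter/dedup/sort pass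
import Mathlib
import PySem

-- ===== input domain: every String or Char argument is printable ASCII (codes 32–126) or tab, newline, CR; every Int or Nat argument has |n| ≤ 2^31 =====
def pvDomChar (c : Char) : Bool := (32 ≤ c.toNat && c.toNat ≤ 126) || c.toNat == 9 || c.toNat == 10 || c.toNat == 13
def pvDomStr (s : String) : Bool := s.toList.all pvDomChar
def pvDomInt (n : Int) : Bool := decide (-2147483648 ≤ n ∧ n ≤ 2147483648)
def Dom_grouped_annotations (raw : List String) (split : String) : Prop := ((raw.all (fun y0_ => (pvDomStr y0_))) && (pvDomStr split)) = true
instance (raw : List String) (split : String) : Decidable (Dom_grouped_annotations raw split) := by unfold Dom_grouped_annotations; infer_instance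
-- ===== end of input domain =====

-- B replaces A's incremental defaultdict-of-sets with a flat corrected pair list
-- followed by a per-distinct-key filter/dedup/sort pass (objective: alternative).


-- ===== PORT A =====
def grouped_annotations (raw : List String) (split : String) : List (String × List String) :=
  let parsed : PySem.Dict String (PySem.Set String) :=
    raw.foldl (fun parsed entry =>
      if PySem.Str.isIn split entry = false then parsed   -- "if split not in entry: continue"
      else
        match PySem.Str.splitMax? entry split 1 with      -- "key, value = entry.split(split, 1)"
        | some [key, value] =>
            let key := if key == "RNACentral" then "RNAcentral" else key
            parsed.modify key PySem.Set.empty (fun s => PySem.Set.add s value)   -- parsed[key].add(value)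
        | _ => parsed) PySem.Dict.empty
  parsed.items.map (fun p => (p.1, PySem.List.sorted p.2 (fun x => x)))   -- {k: sorted(v) …}

-- ===== PORT B =====
def grouped_annotations_alt (raw : List String) (split : String) : List (String × List String) :=
  let pairs : List (String × String) :=
    raw.foldl (fun pairs entry =>
      if PySem.Str.isIn split entry then
        match PySem.Str.splitMax? entry split 1 with
        | none => pairs
        | some parts =>
          match parts with
          | [] => pairs
          | key :: rest =>
            match rest with
            | [] => pairs
            | value :: extra =>
              match extra with
              | [] => pairs ++ [((if key == "RNACentral" then "RNAcentral" else key), value)]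
              | _ :: _ => pairs
      else pairs) []
  let result : PySem.Dict String (List String) :=
    pairs.foldl (fun result p =>
      if result.contains p.1 then result
      else result.insert p.1
        (PySem.List.sorted
          (PySem.Set.ofList ((pairs.filter (fun q => q.1 == p.1)).map (fun q => q.2)))
          (fun x => x))) PySem.Dict.empty
  result.items

-- ===== PRECONDITION & SPEC =====
-- Pre_ excludes exactly the inputs where A raises: split = "" with a nonempty raw
-- makes '"" in entry' true and entry.split("", 1) raise ValueError (empty separator).
def Pre_grouped_annotations (raw : List String) (split : String) : Prop := raw = [] ∨ split ≠ ""
instance (raw : List String) (split : String) : Decidable (Pre_grouped_annotations raw split) := by unfold Pre_grouped_annotations; infer_instance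
def pvWitness_grouped_annotations : List String × String := (["a:b", "RNACentral:x", "a:b", "c"], ":")

def Spec_grouped_annotations (raw : List String) (split : String) (out : List (String × List String)) : Prop := out = grouped_annotations_alt raw split
instance (raw : List String) (split : String) (out : List (String × List String)) : Decidable (Spec_grouped_annotations raw split out) := by unfold Spec_grouped_annotations; infer_instance

-- ===== CLAIM (what is proved, stated in full; the proofs are below) =====
def Claim_equal_grouped_annotations : Prop := ∀ (raw : List String) (split : String), Dom_grouped_annotations raw split → Pre_grouped_annotations raw split → Spec_grouped_annotations raw split (grouped_annotations raw split)

-- ===== LEMMAS AND PROOFS =====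

-- The common per-entry extraction: the corrected (key, value) pair, none when skipped.
def pvKV (split entry : String) : Option (String × String) :=
  if PySem.Str.isIn split entry then
    match PySem.Str.splitMax? entry split 1 with
    | some [key, value] => some ((if key == "RNACentral" then "RNAcentral" else key), value)
    | _ => none
  else none

-- A's loop body, written through pvKV.
theorem pv_stepA_eq (split : String) :
    (fun (parsed : PySem.Dict String (PySem.Set String)) entry =>
      if PySem.Str.isIn split entry = false then parsed
      else
        match PySem.Str.splitMax? entry split 1 with
        | some [key, value] =>
            let key := if key == "RNACentral" then "RNAcentral" else key
            parsed.modify key PySem.Set.empty (fun s => PySem.Set.add s value)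
        | _ => parsed)
    = fun parsed entry =>
        match pvKV split entry with
        | some p => parsed.modify p.1 PySem.Set.empty (fun s => PySem.Set.add s p.2)
        | none => parsed := by
  funext d e
  unfold pvKV
  by_cases h : PySem.Str.isIn split e
  · rw [h, if_neg (by decide), if_pos rfl]
    rcases hs : PySem.Str.splitMax? e split 1 with _ | l
    · rfl
    · match l with
      | [] => rfl
      | [k] => rfl
      | [k, v] => rfl
      | k :: v :: w :: tl' => rfl
  · rw [Bool.not_eq_true] at h
    rw [h, if_pos rfl, if_neg (by decide)]

-- B's first-loop body, written through pvKV.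
theorem pv_stepB_eq (split : String) :
    (fun (pairs : List (String × String)) entry =>
      if PySem.Str.isIn split entry then
        match PySem.Str.splitMax? entry split 1 with
        | none => pairs
        | some parts =>
          match parts with
          | [] => pairs
          | key :: rest =>
            match rest with
            | [] => pairs
            | value :: extra =>
              match extra with
              | [] => pairs ++ [((if key == "RNACentral" then "RNAcentral" else key), value)]
              | _ :: _ => pairs
      else pairs)
    = fun pairs entry =>
        match pvKV split entry with
        | some p => pairs ++ [p]
        | none => pairs := by
  funext acc e
  unfold pvKV
  by_cases h : PySem.Str.isIn split e
  · rw [h, if_pos rfl, if_pos rfl]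
    rcases hs : PySem.Str.splitMax? e split 1 with _ | l
    · rfl
    · match l with
      | [] => rfl
      | [k] => rfl
      | [k, v] => rfl
      | k :: v :: w :: tl' => rfl
  · rw [Bool.not_eq_true] at h
    rw [h, if_neg (by decide), if_neg (by decide)]

-- A's loop over raw is the modify-loop over the extracted pair list.
theorem pv_foldA (raw : List String) (split : String) (d : PySem.Dict String (PySem.Set String)) :
    raw.foldl (fun parsed entry =>
      match pvKV split entry with
      | some p => parsed.modify p.1 PySem.Set.empty (fun s => PySem.Set.add s p.2)
      | none => parsed) d
    = (raw.filterMap (pvKV split)).foldl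
        (fun d p => d.modify p.1 PySem.Set.empty (fun s => PySem.Set.add s p.2)) d := by
  induction raw generalizing d with
  | nil => rfl
  | cons e tl ih =>
    simp only [List.foldl_cons, List.filterMap_cons]
    cases pvKV split e
    · exact ih _
    · exact ih _

-- B's first loop over raw builds exactly the extracted pair list.
theorem pv_foldB_pairs (raw : List String) (split : String) (acc : List (String × String)) :
    raw.foldl (fun pairs entry =>
      match pvKV split entry with
      | some p => pairs ++ [p]
      | none => pairs) acc
    = acc ++ raw.filterMap (pvKV split) := by
  induction raw generalizing acc with
  | nil => simp
  | cons e tl ih =>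
    simp only [List.foldl_cons, List.filterMap_cons]
    cases pvKV split e
    · rw [ih]
    · rw [ih]; simp

-- Value sets accumulated by A's modify loop: the set of this key's values, in order.
theorem pv_modfold_getD (l : List (String × String)) (d : PySem.Dict String (PySem.Set String)) (c : String) :
    (l.foldl (fun d p => d.modify p.1 PySem.Set.empty (fun s => PySem.Set.add s p.2)) d).getD c PySem.Set.empty
    = PySem.Set.update (d.getD c PySem.Set.empty) ((l.filter (fun q => q.1 == c)).map (fun q => q.2)) := by
  induction l generalizing d with
  | nil => simp [PySem.Set.update]
  | cons p tl ih =>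
    simp only [List.foldl_cons, List.filter_cons]
    by_cases h : p.1 = c
    · simp only [h, beq_self_eq_true, if_pos, ih, List.map_cons]
      rw [PySem.Dict.getD_modify]
      simp [PySem.Set.update]
    · have hb : (p.1 == c) = false := beq_false_of_ne h
      simp only [hb, Bool.false_eq_true, if_false, ih]
      rw [PySem.Dict.getD_modify]
      simp [Ne.symm h]

-- Keys produced by B's conditional-insert loop.
theorem pv_condfold_keys (l : List (String × String)) (f : String → List String) (d : PySem.Dict String (List String)) :
    (l.foldl (fun d p => if d.contains p.1 then d else d.insert p.1 (f p.1)) d).keys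
    = PySem.Set.update d.keys (l.map (fun q => q.1)) := by
  induction l generalizing d with
  | nil => simp [PySem.Set.update]
  | cons p tl ih =>
    simp only [List.foldl_cons, List.map_cons]
    have hupd : PySem.Set.update d.keys (p.1 :: tl.map (fun q => q.1))
        = PySem.Set.update (PySem.Set.add d.keys p.1) (tl.map (fun q => q.1)) := by
      simp [PySem.Set.update]
    by_cases h : d.contains p.1
    · have hmem : p.1 ∈ d.keys := (PySem.Dict.contains_iff_mem_keys d p.1).mp h
      have : PySem.Set.add d.keys p.1 = d.keys := by
        simp [PySem.Set.add, PySem.Set.contains, hmem]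
      simp [h, ih, hupd, this]
    · have hmem : p.1 ∉ d.keys := fun hm => h ((PySem.Dict.contains_iff_mem_keys d p.1).mpr hm)
      have hadd : PySem.Set.add d.keys p.1 = d.keys ++ [p.1] := by
        simp [PySem.Set.add, PySem.Set.contains, hmem]
      simp only [h, Bool.false_eq_true, if_false, ih,
        PySem.Dict.keys_insert_of_not_contains d (f p.1) (by simpa using h), hupd, hadd]

-- Values looked up after B's conditional-insert loop.
theorem pv_condfold_getD (l : List (String × String)) (f : String → List String)
    (d : PySem.Dict String (List String)) (c : String) (dflt : List String) :
    (l.foldl (fun d p => if d.contains p.1 then d else d.insert p.1 (f p.1)) d).getD c dflt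
    = if d.contains c then d.getD c dflt
      else if c ∈ l.map (fun q => q.1) then f c else dflt := by
  induction l generalizing d with
  | nil =>
    by_cases hc : d.contains c
    · simp [hc]
    · simp only [List.foldl_nil, List.map_nil, List.not_mem_nil, if_false, hc]
      exact PySem.Dict.getD_of_not_contains d dflt (by simpa using hc)
  | cons p tl ih =>
    simp only [List.foldl_cons, List.map_cons, List.mem_cons]
    by_cases h : d.contains p.1
    · rw [if_pos h, ih]
      by_cases hc : d.contains c
      · simp [hc]
      · have hne : ¬ c = p.1 := fun he => hc (he ▸ h)
        rw [if_neg hc, if_neg hc]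
        by_cases hm : c ∈ tl.map (fun q => q.1)
        · rw [if_pos hm, if_pos (Or.inr hm)]
        · rw [if_neg hm, if_neg (by rintro (he | hm') <;> [exact hne he; exact hm hm'])]
    · rw [if_neg (by simp [h]), ih]
      by_cases hc : c = p.1
      · subst hc
        simp [PySem.Dict.getD_insert, h]
      · rw [PySem.Dict.contains_insert, PySem.Dict.getD_insert]
        have hb : (c == p.1) = false := beq_false_of_ne hc
        rw [hb, Bool.false_or, if_neg hc]
        by_cases hcc : d.contains c
        · simp [hcc]
        · rw [if_neg hcc, if_neg hcc]
          by_cases hm : c ∈ tl.map (fun q => q.1)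
          · rw [if_pos hm, if_pos (Or.inr hm)]
          · rw [if_neg hm, if_neg (by rintro (he | hm') <;> [exact hc he; exact hm hm'])]

-- Both outputs equal the canonical form: distinct keys in first-occurrence order,
-- each with the sorted set of its values.
theorem pv_A_canon (raw : List String) (split : String) :
    grouped_annotations raw split
    = (PySem.Set.ofList ((raw.filterMap (pvKV split)).map (fun q => q.1))).map (fun k =>
        (k, PySem.List.sorted
          (PySem.Set.ofList (((raw.filterMap (pvKV split)).filter (fun q => q.1 == k)).map (fun q => q.2)))
          (fun x => x))) := by
  unfold grouped_annotations
  rw [pv_stepA_eq]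
  simp only [pv_foldA]
  set ps := raw.filterMap (pvKV split) with hps
  have hnd : (ps.foldl (fun d p => d.modify p.1 PySem.Set.empty (fun s => PySem.Set.add s p.2)) PySem.Dict.empty).keys.Nodup := by
    exact PySem.Dict.nodup_keys_foldl_modify_key ps (fun q => q.1) PySem.Set.empty
      (fun _ p s => PySem.Set.add s p.2) PySem.Dict.empty (by simp)
  rw [PySem.Dict.items_eq_map_keys _ hnd PySem.Set.empty]
  rw [PySem.Dict.keys_foldl_modify_key ps (fun q => q.1) PySem.Set.empty (fun _ p s => PySem.Set.add s p.2)]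
  simp only [List.map_map]
  apply List.map_congr_left
  intro k hk
  simp only [Function.comp_apply]
  rw [pv_modfold_getD]
  simp [PySem.Set.update, PySem.Set.ofList_eq_foldl, PySem.Dict.getD_empty]

theorem pv_B_canon (raw : List String) (split : String) :
    grouped_annotations_alt raw split
    = (PySem.Set.ofList ((raw.filterMap (pvKV split)).map (fun q => q.1))).map (fun k =>
        (k, PySem.List.sorted
          (PySem.Set.ofList (((raw.filterMap (pvKV split)).filter (fun q => q.1 == k)).map (fun q => q.2)))
          (fun x => x))) := by
  unfold grouped_annotations_alt
  rw [pv_stepB_eq]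
  simp only [pv_foldB_pairs]
  simp only [List.nil_append]
  set ps := raw.filterMap (pvKV split) with hps
  set f : String → List String := fun k =>
    PySem.List.sorted (PySem.Set.ofList ((ps.filter (fun q => q.1 == k)).map (fun q => q.2))) (fun x => x)
    with hf
  have hkeys : (ps.foldl (fun d p => if d.contains p.1 then d else d.insert p.1 (f p.1)) PySem.Dict.empty).keys
      = PySem.Set.ofList (ps.map (fun q => q.1)) := by
    rw [pv_condfold_keys ps f]
    simp [PySem.Set.update, PySem.Set.ofList_eq_foldl]
  have hnd : (ps.foldl (fun d p => if d.contains p.1 then d else d.insert p.1 (f p.1)) PySem.Dict.empty).keys.Nodup := by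
    rw [hkeys]; exact PySem.Set.nodup_ofList _
  rw [PySem.Dict.items_eq_map_keys _ hnd []]
  rw [hkeys]
  apply List.map_congr_left
  intro k hk
  rw [pv_condfold_getD]
  have hmem : k ∈ ps.map (fun q => q.1) := by
    exact (PySem.Set.mem_ofList (ps.map (fun q => q.1)) k).mp hk
  simp only [PySem.Dict.contains_empty, Bool.false_eq_true, if_false, if_pos hmem]
  rw [hf]

-- ===== VERDICT (by name: the statement is the Claim_ definition above) =====
theorem grouped_annotations_spec : Claim_equal_grouped_annotations := by
  intro raw split _ _
  unfold Spec_grouped_annotations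
  rw [pv_A_canon, pv_B_canon]
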